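-- pv_equiv track=rewrite | github.com/CCreek96/UT-coursework | CS313E/Boxes.py | big_subset
-- ===== SOURCE A (Python) =====
-- def compare_boxes (box1, box2):
--
-- 	return (box1[0] < box2[0]) and (box1[1] < box2[1]) and (box1[2] < box2[2])
--
-- def big_subset (sub_list):
--
-- 	largest_sub = []
-- 	fitting_subs = []
-- 	len_sub = 0
--
--
-- 	# Confirm subsets in largest_subset contain nested boxes
-- 	for sub in range (len (sub_list)):
-- 		if len (sub_list[sub]) > 1:
-- 			for box in range (1, len (sub_list[sub])):
-- 				if compare_boxes (sub_list[sub][box - 1], sub_list[sub][box]):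
-- 					if box + 1 == len(sub_list[sub]):
-- 						fitting_subs.append(sub_list[sub])
-- 				else:
-- 					break
-- 		else:
-- 			pass
--
-- 	# Find largest subset length
-- 	for sub in range (len(fitting_subs)):
-- 		if len(fitting_subs[sub]) >= len_sub:
-- 			len_sub = len(fitting_subs[sub])
-- 		else:
-- 			continue
--
-- 	# Append subsets with length equal to the largest subset length
-- 	for sub in range (len(fitting_subs)):
-- 		if (len(fitting_subs[sub]) == len_sub):
-- 			largest_sub.append(fitting_subs[sub])
-- 		else:
-- 			continue
--
-- 	return largest_sub
-- ===== SOURCE B (Python) =====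
-- def big_subset(sub_list):
--     best_len = 0
--     result = []
--     for s in sub_list:
--         if len(s) >= 2 and all(a[0] < b[0] and a[1] < b[1] and a[2] < b[2]
--                                for a, b in zip(s, s[1:])):
--             if len(s) > best_len:
--                 best_len = len(s)
--                 result = [s]
--             elif len(s) == best_len:
--                 result.append(s)
--     return result
-- ===== Notes on version B (the rewrite author's own statement) =====
-- stated objective: alternative
-- what changed: Single accumulating pass that checks chain-nesting via pairwise zip and maintains the running best length with its list of subsets, instead of A's index-based inner loop with break plus two further full passes over the collected list.
import Mathlib
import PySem

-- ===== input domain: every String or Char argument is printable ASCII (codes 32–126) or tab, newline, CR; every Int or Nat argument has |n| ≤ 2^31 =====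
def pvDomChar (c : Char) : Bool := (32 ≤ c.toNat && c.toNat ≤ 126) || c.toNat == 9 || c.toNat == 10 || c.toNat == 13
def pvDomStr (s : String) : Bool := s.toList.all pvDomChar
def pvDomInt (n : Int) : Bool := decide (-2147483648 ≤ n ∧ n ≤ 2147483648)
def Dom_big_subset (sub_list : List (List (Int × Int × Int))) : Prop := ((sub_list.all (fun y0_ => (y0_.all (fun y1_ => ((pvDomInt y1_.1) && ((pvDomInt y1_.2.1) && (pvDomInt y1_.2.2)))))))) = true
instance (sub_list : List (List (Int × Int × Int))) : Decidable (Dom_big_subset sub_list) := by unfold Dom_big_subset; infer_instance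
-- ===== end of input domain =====

-- B fuses A's three passes (collect chain-valid sublists, find max length, filter)
-- into one accumulating pass keeping the running best length (alternative decomposition).

-- ===== PORT A =====
def compare_boxes (box1 box2 : Int × Int × Int) : Bool :=
  decide (box1.1 < box2.1) && decide (box1.2.1 < box2.2.1) && decide (box1.2.2 < box2.2.2)

-- A's inner 'for box in range(1, len(sub)): … else: break' loop, as structural
-- recursion on the index; all indexing is in range, so pyGetD's default is never read.
def bigInner (s : List (Int × Int × Int)) (box : Int)
    (fitting : List (List (Int × Int × Int))) : List (List (Int × Int × Int)) :=
  if h : box < (s.length : Int) then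
    if compare_boxes (PySem.List.pyGetD s (box - 1) (0, 0, 0)) (PySem.List.pyGetD s box (0, 0, 0)) then
      -- 'fitting_subs.append(...)' happens when box+1 == len; then the loop continues
      if box + 1 = (s.length : Int) then bigInner s (box + 1) (fitting ++ [s])
      else bigInner s (box + 1) fitting
    else fitting
  else fitting
termination_by ((s.length : Int) - box).toNat
decreasing_by all_goals omega

def big_subset (sub_list : List (List (Int × Int × Int))) : List (List (Int × Int × Int)) :=
  -- first loop: confirm subsets contain nested boxes
  let fitting_subs := (PySem.List.pyRange 0 (sub_list.length : Int) 1).foldl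
    (fun fitting sub =>
      let s := PySem.List.pyGetD sub_list sub []
      if 1 < s.length then bigInner s 1 fitting else fitting) []
  -- second loop: find largest subset length
  let len_sub := (PySem.List.pyRange 0 (fitting_subs.length : Int) 1).foldl
    (fun len_sub sub =>
      let f := PySem.List.pyGetD fitting_subs sub []
      if len_sub ≤ f.length then f.length else len_sub) 0
  -- third loop: append subsets with length equal to the largest subset length
  (PySem.List.pyRange 0 (fitting_subs.length : Int) 1).foldl
    (fun largest sub =>
      let f := PySem.List.pyGetD fitting_subs sub []
      if f.length = len_sub then largest ++ [f] else largest) []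

-- ===== PORT B =====
-- the body of B's single loop over sub_list, named as a helper
def bStep (st : Nat × List (List (Int × Int × Int))) (s : List (Int × Int × Int)) :
    Nat × List (List (Int × Int × Int)) :=
  if decide (2 ≤ s.length) &&
      (s.zip (s.drop 1)).all
        (fun p => decide (p.1.1 < p.2.1) && decide (p.1.2.1 < p.2.2.1) && decide (p.1.2.2 < p.2.2.2)) then
    if st.1 < s.length then (s.length, [s])
    else if s.length = st.1 then (st.1, st.2 ++ [s])
    else st
  else st

def big_subset_alt (sub_list : List (List (Int × Int × Int))) : List (List (Int × Int × Int)) :=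
  (sub_list.foldl bStep (0, [])).2

-- ===== PRECONDITION & SPEC =====
def Spec_big_subset (sub_list : List (List (Int × Int × Int))) (out : List (List (Int × Int × Int))) : Prop := out = big_subset_alt sub_list
instance (sub_list : List (List (Int × Int × Int))) (out : List (List (Int × Int × Int))) : Decidable (Spec_big_subset sub_list out) := by unfold Spec_big_subset; infer_instance

-- ===== CLAIM (what is proved, stated in full; the proofs are below) =====
def Claim_equal_big_subset : Prop := ∀ (sub_list : List (List (Int × Int × Int))), Dom_big_subset sub_list → Spec_big_subset sub_list (big_subset sub_list)

-- ===== LEMMAS AND PROOFS =====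

-- the chain-validity test both programs implement
def pvValid (s : List (Int × Int × Int)) : Bool :=
  decide (1 < s.length) && (s.zip (s.drop 1)).all (fun p => compare_boxes p.1 p.2)

-- A's second loop as a function of the collected list
def pvMaxLen (fit : List (List (Int × Int × Int))) : Nat :=
  fit.foldl (fun n f => if n ≤ f.length then f.length else n) 0

theorem pvMaxLen_le (fit : List (List (Int × Int × Int))) :
    ∀ init : Nat, init ≤ fit.foldl (fun n f => if n ≤ f.length then f.length else n) init := by
  induction fit with
  | nil => intro init; simp
  | cons g t ih =>
    intro init
    simp only [List.foldl_cons]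
    refine le_trans ?_ (ih _)
    split <;> omega

theorem pvMaxLen_mem_le (fit : List (List (Int × Int × Int))) (f : List (Int × Int × Int))
    (hf : f ∈ fit) :
    ∀ init : Nat, f.length ≤ fit.foldl (fun n f => if n ≤ f.length then f.length else n) init := by
  induction fit with
  | nil => cases hf
  | cons g t ih =>
    intro init
    rcases List.mem_cons.1 hf with rfl | hmem
    · simp only [List.foldl_cons]
      refine le_trans ?_ (pvMaxLen_le t _)
      split <;> omega
    · exact ih hmem _

theorem pvMaxLen_append_singleton (fit : List (List (Int × Int × Int))) (s : List (Int × Int × Int)) :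
    pvMaxLen (fit ++ [s]) = if pvMaxLen fit ≤ s.length then s.length else pvMaxLen fit := by
  simp [pvMaxLen, List.foldl_append]

-- A's inner loop appends s exactly when the comparison chain from index `box` on holds
theorem bigInner_eq (s : List (Int × Int × Int)) :
    ∀ n box fitting, s.length - box = n → 1 ≤ box → box < s.length →
      bigInner s (box : Int) fitting =
        fitting ++ (if ((s.drop (box - 1)).zip (s.drop box)).all (fun p => compare_boxes p.1 p.2)
                    then [s] else []) := by
  intro n
  induction n with
  | zero => intro box fitting h1 h2 h3; omega
  | succ k ih =>
    intro box fitting h1 h2 h3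
    have hb1 : box - 1 < s.length := by omega
    have hbox : box < s.length := h3
    rw [bigInner]
    have hget1 : PySem.List.pyGetD s ((box : Int) - 1) (0, 0, 0) = s[box - 1] := by
      rw [show ((box : Int) - 1) = ((box - 1 : Nat) : Int) by omega]
      simp [PySem.List.pyGetD_natCast, List.getD_eq_getElem?_getD, List.getElem?_eq_getElem hb1]
    have hget2 : PySem.List.pyGetD s (box : Int) (0, 0, 0) = s[box] := by
      simp [PySem.List.pyGetD_natCast, List.getD_eq_getElem?_getD, List.getElem?_eq_getElem hbox]
    have hdrop1 : s.drop (box - 1) = s[box - 1] :: s.drop box := by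
      have := List.drop_eq_getElem_cons hb1
      simpa [show box - 1 + 1 = box by omega] using this
    have hdrop2 : s.drop box = s[box] :: s.drop (box + 1) := List.drop_eq_getElem_cons hbox
    have hcond : (((s.drop (box - 1)).zip (s.drop box)).all (fun p => compare_boxes p.1 p.2))
        = (compare_boxes s[box - 1] s[box] &&
           ((s.drop box).zip (s.drop (box + 1))).all (fun p => compare_boxes p.1 p.2)) := by
      conv_lhs => rw [hdrop1]
      conv_lhs => rw [hdrop2]
      rw [List.zip_cons_cons, List.all_cons]
      conv_lhs => rw [← hdrop2]
    rw [dif_pos (by exact_mod_cast hbox)]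
    rw [hget1, hget2]
    by_cases hc : compare_boxes s[box - 1] s[box] = true
    · rw [if_pos hc]
      rw [show ((box : Int) + 1) = ((box + 1 : Nat) : Int) by push_cast; ring]
      by_cases hlast : box + 1 = s.length
      · rw [if_pos (show ((box + 1 : Nat) : Int) = (s.length : Int) by exact_mod_cast hlast)]
        rw [bigInner]
        rw [dif_neg (by push_cast; omega)]
        have hnil : s.drop (box + 1) = [] :=
          List.drop_eq_nil_of_le (by omega : s.length ≤ box + 1)
        rw [hcond, hc, hnil]
        simp
      · have hlt : box + 1 < s.length := by omega
        rw [if_neg (show ¬ ((box + 1 : Nat) : Int) = (s.length : Int) by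
          intro h; exact hlast (by exact_mod_cast h))]
        rw [ih (box + 1) fitting (by omega) (by omega) hlt]
        rw [hcond, hc]
        simp only [Nat.add_sub_cancel, Bool.true_and]
    · rw [if_neg hc]
      rw [hcond]
      simp [Bool.eq_false_iff.mp (by simpa using hc)]

-- A's first loop collects exactly the chain-valid sublists, in order
theorem bigOuter_step (fitting : List (List (Int × Int × Int))) (s : List (Int × Int × Int)) :
    (if 1 < s.length then bigInner s 1 fitting else fitting)
      = if pvValid s then fitting ++ [s] else fitting := by
  by_cases h : 1 < s.length
  · rw [if_pos h]
    have := bigInner_eq s (s.length - 1) 1 fitting (by omega) (by omega) h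
    simp only [Nat.cast_one, Nat.sub_self, List.drop_zero] at this
    rw [this]
    have hv : pvValid s = (s.zip (s.drop 1)).all (fun p => compare_boxes p.1 p.2) := by
      simp [pvValid, h]
    rcases Bool.eq_false_or_eq_true ((s.zip (s.drop 1)).all (fun p => compare_boxes p.1 p.2))
        with hall | hall <;> rw [hall] at hv <;> rw [hall, hv] <;> simp
  · rw [if_neg h]
    have : pvValid s = false := by
      simp [pvValid]
      omega
    simp [this]

-- B's fold maintains (max length so far, the valid sublists of that length so far)
theorem bFold_invariant (l : List (List (Int × Int × Int))) :
    ∀ fit : List (List (Int × Int × Int)),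
      l.foldl bStep (pvMaxLen fit, fit.filter (fun f => decide (f.length = pvMaxLen fit)))
        = (pvMaxLen (fit ++ l.filter pvValid),
           (fit ++ l.filter pvValid).filter
             (fun f => decide (f.length = pvMaxLen (fit ++ l.filter pvValid)))) := by
  induction l with
  | nil => intro fit; simp
  | cons s t ih =>
    intro fit
    by_cases hv : pvValid s = true
    · have hstep : bStep (pvMaxLen fit, fit.filter (fun f => decide (f.length = pvMaxLen fit))) s
          = (pvMaxLen (fit ++ [s]),
             (fit ++ [s]).filter (fun f => decide (f.length = pvMaxLen (fit ++ [s])))) := by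
        have hcond : (decide (2 ≤ s.length) &&
            (s.zip (s.drop 1)).all
              (fun p => decide (p.1.1 < p.2.1) && decide (p.1.2.1 < p.2.2.1) && decide (p.1.2.2 < p.2.2.2))) = true := by
          have : (fun p : (Int×Int×Int) × (Int×Int×Int) =>
              decide (p.1.1 < p.2.1) && decide (p.1.2.1 < p.2.2.1) && decide (p.1.2.2 < p.2.2.2))
              = (fun p => compare_boxes p.1 p.2) := by
            funext p; simp [compare_boxes]
          rw [this]
          simpa [pvValid, Nat.lt_iff_add_one_le] using hv
        unfold bStep
        rw [if_pos hcond]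
        rcases Nat.lt_trichotomy (pvMaxLen fit) s.length with hlt | heq | hgt
        · rw [if_pos hlt]
          rw [pvMaxLen_append_singleton, if_pos (by omega)]
          have hnone : fit.filter (fun f => decide (f.length = s.length)) = [] := by
            rw [List.filter_eq_nil_iff]
            intro f hf
            have := pvMaxLen_mem_le fit f hf 0
            simp only [decide_eq_true_eq]
            intro hEq
            exact absurd hEq (by unfold pvMaxLen at *; omega)
          simp [List.filter_append, hnone]
        · simp only [if_neg (by omega : ¬ pvMaxLen fit < s.length), if_pos heq.symm]
          rw [pvMaxLen_append_singleton, if_pos (by omega)]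
          simp [List.filter_append, heq]
        · have hne : ¬ s.length = pvMaxLen fit := by omega
          rw [if_neg (by omega : ¬ pvMaxLen fit < s.length), if_neg hne]
          rw [pvMaxLen_append_singleton, if_neg (by omega)]
          simp [List.filter_append, (by omega : ¬ s.length = pvMaxLen fit)]
      simp only [List.foldl_cons, hstep, ih (fit ++ [s])]
      simp [List.filter_cons, hv]
    · have hv' : pvValid s = false := Bool.eq_false_iff.mpr (by simpa using hv)
      have hstep : ∀ st, bStep st s = st := by
        intro st
        unfold bStep
        rw [if_neg ?_]
        have : (fun p : (Int×Int×Int) × (Int×Int×Int) =>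
            decide (p.1.1 < p.2.1) && decide (p.1.2.1 < p.2.2.1) && decide (p.1.2.2 < p.2.2.2))
            = (fun p => compare_boxes p.1 p.2) := by
          funext p; simp [compare_boxes]
        rw [this]
        intro hcond
        have : pvValid s = true := by
          simpa [pvValid, Nat.lt_iff_add_one_le] using hcond
        rw [hv'] at this; exact absurd this (by simp)
      simp only [List.foldl_cons, hstep, ih fit]
      simp [hv']

-- ===== VERDICT (by name: the statement is the Claim_ definition above) =====
theorem big_subset_spec : Claim_equal_big_subset := by
  intro sub_list _
  unfold Spec_big_subset big_subset big_subset_alt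
  simp only []
  -- A's first range-loop becomes a fold over sub_list itself
  rw [PySem.List.foldl_pyRange_zero_pyGetD' sub_list []
    (fun fitting s => if 1 < s.length then bigInner s 1 fitting else fitting) []]
  -- … which collects exactly the chain-valid sublists
  have hcong : List.foldl (fun fitting s => if 1 < s.length then bigInner s 1 fitting else fitting)
      [] sub_list
      = List.foldl (fun fitting s => if pvValid s = true then fitting ++ [s] else fitting)
        [] sub_list :=
    PySem.List.foldl_congr_mem _ _ _ _ (fun acc s _ => bigOuter_step acc s)
  rw [hcong]
  rw [PySem.List.foldl_append_if_eq_filter pvValid]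
  simp only [List.nil_append]
  -- A's second range-loop computes pvMaxLen of that list
  have h2 : (PySem.List.pyRange 0 (((sub_list.filter pvValid).length : Int)) 1).foldl
      (fun len_sub sub =>
        if len_sub ≤ (PySem.List.pyGetD (sub_list.filter pvValid) sub []).length
        then (PySem.List.pyGetD (sub_list.filter pvValid) sub []).length else len_sub) 0
      = pvMaxLen (sub_list.filter pvValid) := by
    rw [PySem.List.foldl_pyRange_zero_pyGetD' (sub_list.filter pvValid) []
      (fun n f => if n ≤ f.length then f.length else n) 0]
    rfl
  rw [h2]
  -- A's third range-loop filters for that length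
  rw [PySem.List.foldl_pyRange_zero_pyGetD' (sub_list.filter pvValid) []
    (fun largest f => if f.length = pvMaxLen (sub_list.filter pvValid)
      then largest ++ [f] else largest) []]
  have h3 : List.foldl (fun largest f =>
        if f.length = pvMaxLen (sub_list.filter pvValid) then largest ++ [f] else largest)
        [] (sub_list.filter pvValid)
      = [] ++ (sub_list.filter pvValid).filter
          (fun f => decide (f.length = pvMaxLen (sub_list.filter pvValid))) :=
    PySem.List.foldl_append_ite_eq_filter _ _ _
  rw [h3]
  simp only [List.nil_append]
  -- B's single fold maintains exactly (that max length, that filtered list)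
  have hB := bFold_invariant sub_list []
  simp only [List.nil_append, List.filter_nil] at hB
  have h0 : pvMaxLen ([] : List (List (Int × Int × Int))) = 0 := rfl
  rw [h0] at hB
  rw [hB]
  rfl
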